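-- pv_equiv track=rewrite | github.com/llanalytics/amlInsightsDataHub | scripts/update_ofac_sdn_sample.py | _transform_header_row
-- ===== SOURCE A (Python) =====
-- def _clean(value: str | None) -> str:
--     return (value or "").strip()
--
-- def _normalize_header_name(name: str) -> str:
--     return "".join(ch for ch in name.strip().lower() if ch.isalnum() or ch == "_")
--
-- def _pick(row: dict[str, str], *keys: str) -> str:
--     for key in keys:
--         if key in row:
--             return _clean(row.get(key))
--     return ""
--
-- def _transform_header_row(row: dict[str, str]) -> dict[str, str]:
--     normalized = {_normalize_header_name(k): v for k, v in row.items()}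
--     return {
--         "sdn_uid": _pick(normalized, "uid", "ent_num", "entityid", "entity_id", "id"),
--         "name": _pick(normalized, "sdn_name", "name"),
--         "sdn_type": _pick(normalized, "sdn_type", "type"),
--         "program_list": _pick(normalized, "program", "programs", "program_list"),
--         "title": _pick(normalized, "title"),
--         "call_sign": _pick(normalized, "call_sign", "callsign"),
--         "vessel_type": _pick(normalized, "vess_type", "vessel_type"),
--         "tonnage": _pick(normalized, "tonnage"),
--         "gross_registered_tonnage": _pick(normalized, "grt", "gross_registered_tonnage"),
--         "vessel_flag": _pick(normalized, "vess_flag", "vessel_flag"),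
--         "vessel_owner": _pick(normalized, "vess_owner", "vessel_owner"),
--         "remarks": _pick(normalized, "remarks", "comment", "comments", "notes"),
--     }
-- ===== SOURCE B (Python) =====
-- def _clean(value: str | None) -> str:
--     return (value or "").strip()
--
-- def _normalize_header_name(name: str) -> str:
--     return "".join(ch for ch in name.strip().lower() if ch.isalnum() or ch == "_")
--
-- _FIELD_KEYS = [
--     ("sdn_uid", ["uid", "ent_num", "entityid", "entity_id", "id"]),
--     ("name", ["sdn_name", "name"]),
--     ("sdn_type", ["sdn_type", "type"]),
--     ("program_list", ["program", "programs", "program_list"]),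
--     ("title", ["title"]),
--     ("call_sign", ["call_sign", "callsign"]),
--     ("vessel_type", ["vess_type", "vessel_type"]),
--     ("tonnage", ["tonnage"]),
--     ("gross_registered_tonnage", ["grt", "gross_registered_tonnage"]),
--     ("vessel_flag", ["vess_flag", "vessel_flag"]),
--     ("vessel_owner", ["vess_owner", "vessel_owner"]),
--     ("remarks", ["remarks", "comment", "comments", "notes"]),
-- ]
--
-- # alias -> (target field, rank = position in that field's priority list)
-- _ALIAS_TABLE = {
--     alias: (field, rank)
--     for field, aliases in _FIELD_KEYS
--     for rank, alias in enumerate(aliases)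
-- }
--
-- def _transform_header_row(row: dict[str, str]) -> dict[str, str]:
--     result = {field: "" for field, _ in _FIELD_KEYS}
--     best: dict[str, int] = {}
--     for key, value in row.items():
--         hit = _ALIAS_TABLE.get(_normalize_header_name(key))
--         if hit is not None:
--             field, rank = hit
--             if field not in best or rank <= best[field]:
--                 best[field] = rank
--                 result[field] = _clean(value)
--     return result
-- ===== Notes on version B (the rewrite author's own statement) =====
-- stated objective: idiomatic
-- what changed: B replaces A's twelve per-field scans over alias priority lists (each doing membership tests against the normalized dict) by a single static alias->(field, rank) reverse-lookup table and one rank-tiebreaking pass over the row's columns.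
import Mathlib
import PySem

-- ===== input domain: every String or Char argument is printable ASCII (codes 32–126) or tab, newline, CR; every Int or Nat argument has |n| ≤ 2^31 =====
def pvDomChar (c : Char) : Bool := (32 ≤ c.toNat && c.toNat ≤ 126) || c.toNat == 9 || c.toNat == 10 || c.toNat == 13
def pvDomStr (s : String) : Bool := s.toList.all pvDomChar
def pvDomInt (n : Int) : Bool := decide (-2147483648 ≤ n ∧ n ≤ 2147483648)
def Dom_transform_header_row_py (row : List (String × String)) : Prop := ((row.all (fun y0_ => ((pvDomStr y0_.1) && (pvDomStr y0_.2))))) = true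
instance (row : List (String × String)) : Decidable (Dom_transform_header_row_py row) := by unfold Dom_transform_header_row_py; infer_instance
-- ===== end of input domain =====

-- B replaces A's twelve per-field alias scans over the normalized dict by one static
-- alias→(field, rank) table and a single rank-tiebreaking pass over the columns (objective: idiomatic).

-- ===== PORT A =====
-- _clean(value): (value or "").strip()  ('value or ""' is the identity test written out)
def pvClean (value : String) : String := PySem.Str.strip (if value == "" then "" else value)

-- _normalize_header_name: "".join(ch for ch in name.strip().lower() if ch.isalnum() or ch == "_")
def pvNormName (name : String) : String :=
  String.mk (((PySem.Str.lower (PySem.Str.strip name)).toList).filter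
    (fun ch => PySem.Chars.isalnum ch || ch == '_'))

-- _pick(row, *keys): first key present wins
def pvPick (row : PySem.Dict String String) (keys : List String) : String :=
  match keys with
  | [] => ""
  | k :: ks => if row.contains k then pvClean ((row.get? k).getD "") else pvPick row ks

def transform_header_row_py (row : List (String × String)) : List (String × String) :=
  let normalized : PySem.Dict String String :=
    row.foldl (fun d p => d.insert (pvNormName p.1) p.2) PySem.Dict.empty
  [("sdn_uid", pvPick normalized ["uid", "ent_num", "entityid", "entity_id", "id"]),
   ("name", pvPick normalized ["sdn_name", "name"]),
   ("sdn_type", pvPick normalized ["sdn_type", "type"]),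
   ("program_list", pvPick normalized ["program", "programs", "program_list"]),
   ("title", pvPick normalized ["title"]),
   ("call_sign", pvPick normalized ["call_sign", "callsign"]),
   ("vessel_type", pvPick normalized ["vess_type", "vessel_type"]),
   ("tonnage", pvPick normalized ["tonnage"]),
   ("gross_registered_tonnage", pvPick normalized ["grt", "gross_registered_tonnage"]),
   ("vessel_flag", pvPick normalized ["vess_flag", "vessel_flag"]),
   ("vessel_owner", pvPick normalized ["vess_owner", "vessel_owner"]),
   ("remarks", pvPick normalized ["remarks", "comment", "comments", "notes"])]

-- ===== PORT B =====
def pvFieldKeys : List (String × List String) :=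
  [("sdn_uid", ["uid", "ent_num", "entityid", "entity_id", "id"]),
   ("name", ["sdn_name", "name"]),
   ("sdn_type", ["sdn_type", "type"]),
   ("program_list", ["program", "programs", "program_list"]),
   ("title", ["title"]),
   ("call_sign", ["call_sign", "callsign"]),
   ("vessel_type", ["vess_type", "vessel_type"]),
   ("tonnage", ["tonnage"]),
   ("gross_registered_tonnage", ["grt", "gross_registered_tonnage"]),
   ("vessel_flag", ["vess_flag", "vessel_flag"]),
   ("vessel_owner", ["vess_owner", "vessel_owner"]),
   ("remarks", ["remarks", "comment", "comments", "notes"])]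

-- _ALIAS_TABLE = {alias: (field, rank) for field, aliases in _FIELD_KEYS for rank, alias in enumerate(aliases)}
def pvAliasTable : PySem.Dict String (String × Int) :=
  PySem.Dict.ofList
    (pvFieldKeys.flatMap (fun p => (PySem.List.enumerate p.2 0).map (fun q => (q.2, (p.1, q.1)))))

-- the loop body of B
def pvStepB (st : PySem.Dict String String × PySem.Dict String Int) (p : String × String) :
    PySem.Dict String String × PySem.Dict String Int :=
  match pvAliasTable.get? (pvNormName p.1) with
  | some (field, rank) =>
      if !(st.2.contains field) || rank ≤ st.2.getD field 0 then
        (st.1.insert field (pvClean p.2), st.2.insert field rank)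
      else st
  | none => st

def transform_header_row_py_alt (row : List (String × String)) : List (String × String) :=
  let init : PySem.Dict String String := PySem.Dict.ofList (pvFieldKeys.map (fun p => (p.1, "")))
  let st := row.foldl pvStepB (init, PySem.Dict.empty)
  st.1.items

-- ===== PRECONDITION & SPEC =====
def Spec_transform_header_row_py (row : List (String × String)) (out : List (String × String)) : Prop := out = transform_header_row_py_alt row
instance (row : List (String × String)) (out : List (String × String)) : Decidable (Spec_transform_header_row_py row out) := by unfold Spec_transform_header_row_py; infer_instance

-- ===== CLAIM (what is proved, stated in full; the proofs are below) =====
def Claim_equal_transform_header_row_py : Prop := ∀ (row : List (String × String)), Dom_transform_header_row_py row → Spec_transform_header_row_py row (transform_header_row_py row)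

-- ===== LEMMAS AND PROOFS =====

-- the normalized dict A builds
def pvNormDict (row : List (String × String)) : PySem.Dict String String :=
  row.foldl (fun d p => d.insert (pvNormName p.1) p.2) PySem.Dict.empty

-- alias scan with explicit ranks, over an arbitrary dict
def pvRankVal (d : PySem.Dict String String) : List String → Int → Option (Int × String)
  | [], _ => none
  | a :: as, i =>
      if d.contains a then some (i, pvClean ((d.get? a).getD "")) else pvRankVal d as (i + 1)

-- pvNormDict is the fold A performs
theorem pvNormDict_append (row : List (String × String)) (p : String × String) :
    pvNormDict (row ++ [p]) = (pvNormDict row).insert (pvNormName p.1) p.2 := by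
  simp [pvNormDict, List.foldl_append]

theorem pvRankVal_rank_ge (d : PySem.Dict String String) (ks : List String) :
    ∀ (i r : Int) (w : String), pvRankVal d ks i = some (r, w) → i ≤ r := by
  induction ks with
  | nil => intro i r w h; simp [pvRankVal] at h
  | cons a as ih =>
      intro i r w h
      simp only [pvRankVal] at h
      by_cases hc : d.contains a
      · simp [hc] at h; omega
      · simp [hc] at h
        have := ih (i + 1) r w h
        omega

theorem pvPick_eq_rankVal (d : PySem.Dict String String) (ks : List String) (i : Int) :
    pvPick d ks = ((pvRankVal d ks i).map Prod.snd).getD "" := by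
  induction ks generalizing i with
  | nil => simp [pvPick, pvRankVal]
  | cons a as ih =>
      by_cases hc : d.contains a
      · simp [pvPick, pvRankVal, hc]
      · simp [pvPick, pvRankVal, hc, ih (i + 1)]

theorem pvRankVal_insert_not_mem (d : PySem.Dict String String) (n : String) (v : String)
    (ks : List String) (h : n ∉ ks) (i : Int) :
    pvRankVal (d.insert n v) ks i = pvRankVal d ks i := by
  induction ks generalizing i with
  | nil => rfl
  | cons a as ih =>
      have hne : a ≠ n := fun hh => h (by simp [hh])
      simp only [pvRankVal, PySem.Dict.contains_insert,
        PySem.Dict.get?_insert_of_ne _ _ hne]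
      have : (a == n) = false := by simp [hne]
      rw [this]
      simp only [Bool.false_or]
      rw [ih (fun hh => h (by simp [hh]))]

theorem pvRankVal_insert_mem (d : PySem.Dict String String) (n : String) (v : String)
    (ks : List String) (hnd : ks.Nodup) (h : n ∈ ks) (i : Int) :
    pvRankVal (d.insert n v) ks i =
      match pvRankVal d ks i with
      | none => some (i + (ks.idxOf n : Int), pvClean v)
      | some (r, w) =>
          if i + (ks.idxOf n : Int) ≤ r then some (i + (ks.idxOf n : Int), pvClean v)
          else some (r, w) := by
  induction ks generalizing i with
  | nil => simp at h
  | cons a as ih =>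
      by_cases han : a = n
      · subst han
        simp only [pvRankVal, PySem.Dict.contains_insert, BEq.rfl, Bool.true_or, if_true,
          PySem.Dict.get?_insert_self, List.idxOf_cons_self, Nat.cast_zero, add_zero]
        cases hc : d.contains a with
        | true => simp
        | false =>
            simp only [Bool.false_eq_true, if_false]
            cases hm : pvRankVal d as (i + 1) with
            | none => simp
            | some rw =>
                obtain ⟨r, w⟩ := rw
                have hge := pvRankVal_rank_ge d as (i + 1) r w hm
                simp only
                rw [if_pos (by omega)]; rfl
      · have hn : n ∈ as := by cases h with | head => exact absurd rfl han | tail _ hh => exact hh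
        have hba : (a == n) = false := by simp [han]
        have hidx : List.idxOf n (a :: as) = List.idxOf n as + 1 := by
          rw [List.idxOf_cons, hba]; rfl
        have hcast : ∀ j : Int, j + ((List.idxOf n as + 1 : Nat) : Int)
            = (j + 1) + (List.idxOf n as : Int) := by intro j; push_cast; ring
        simp only [pvRankVal, PySem.Dict.contains_insert, hba, Bool.false_or,
          PySem.Dict.get?_insert_of_ne _ _ han, hidx]
        cases hc : d.contains a with
        | true =>
            simp only [if_true]
            rw [if_neg (by omega)]
        | false =>
            simp only [Bool.false_eq_true, if_false]
            rw [ih hnd.of_cons hn (i + 1)]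
            cases hm : pvRankVal d as (i + 1) with
            | none => simp only; rw [hcast i]
            | some rw =>
                obtain ⟨r, w⟩ := rw
                simp only
                rw [hcast i]

-- the initial result dict of B
def pvInit : PySem.Dict String String := PySem.Dict.ofList (pvFieldKeys.map (fun p => (p.1, "")))

-- closed facts about the static tables (all by computation)
theorem pvF1 : ∀ p ∈ pvFieldKeys, ∀ a ∈ p.2, pvAliasTable.contains a = true := by decide

theorem pvF2 : ∀ q ∈ pvAliasTable.items, ∀ p ∈ pvFieldKeys,
    (q.2.1 = p.1 → q.1 ∈ p.2 ∧ ((p.2.idxOf q.1 : Int) = q.2.2)) ∧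
    (q.2.1 ≠ p.1 → ¬ q.1 ∈ p.2) := by decide

theorem pvF3 : ∀ q ∈ pvAliasTable.items, q.2.1 ∈ pvFieldKeys.map Prod.fst := by decide

theorem pvF4 : ∀ p ∈ pvFieldKeys, p.2.Nodup := by decide

theorem pvF5 : (pvFieldKeys.map Prod.fst).Nodup := by decide

-- the loop invariant of B's single pass
theorem pvFoldB_inv (row : List (String × String)) :
    ((row.foldl pvStepB (pvInit, PySem.Dict.empty)).1.keys = pvFieldKeys.map Prod.fst)
    ∧ ∀ p ∈ pvFieldKeys,
        (row.foldl pvStepB (pvInit, PySem.Dict.empty)).2.get? p.1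
          = (pvRankVal (pvNormDict row) p.2 0).map Prod.fst
        ∧ (row.foldl pvStepB (pvInit, PySem.Dict.empty)).1.getD p.1 ""
          = ((pvRankVal (pvNormDict row) p.2 0).map Prod.snd).getD "" := by
  induction row using List.reverseRecOn with
  | nil => exact ⟨by decide, by decide⟩
  | append_singleton row q ih =>
      obtain ⟨ihk, ihf⟩ := ih
      rw [List.foldl_append] at *
      simp only [List.foldl_cons, List.foldl_nil]
      rw [pvNormDict_append]
      set st := row.foldl pvStepB (pvInit, PySem.Dict.empty) with hst
      cases hhit : pvAliasTable.get? (pvNormName q.1) with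
      | none =>
          have hnc : pvAliasTable.contains (pvNormName q.1) = false := by
            rw [PySem.Dict.contains_eq_isSome_get?, hhit]; rfl
          have hstep : pvStepB st q = st := by simp [pvStepB, hhit]
          rw [hstep]
          refine ⟨ihk, fun p hp => ?_⟩
          have hnm : pvNormName q.1 ∉ p.2 := fun hm => by
            have := pvF1 p hp _ hm; rw [hnc] at this; cases this
          rw [pvRankVal_insert_not_mem _ _ _ _ hnm]
          exact ihf p hp
      | some gr =>
          obtain ⟨g, r⟩ := gr
          have hq : (pvNormName q.1, (g, r)) ∈ pvAliasTable.items :=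
            PySem.Dict.mem_items_of_get?_eq_some _ hhit
          have hgmem : g ∈ pvFieldKeys.map Prod.fst := pvF3 _ hq
          have hgc : st.1.contains g = true := by
            rw [PySem.Dict.contains_eq_decide_mem_keys, ihk]; simp [hgmem]
          have hkeep : ∀ v', (st.1.insert g v').keys = pvFieldKeys.map Prod.fst := by
            intro v'; rw [PySem.Dict.keys_insert_of_contains _ _ hgc, ihk]
          constructor
          · simp only [pvStepB, hhit]
            split_ifs with hcond
            · exact hkeep _
            · exact ihk
          · intro p hp
            by_cases hg : g = p.1
            · -- the alias feeds field p
              subst hg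
              obtain ⟨hmem0, hidx0⟩ := (pvF2 _ hq p hp).1 rfl
              have hmem : pvNormName q.1 ∈ p.2 := hmem0
              have hidx : ((p.2.idxOf (pvNormName q.1) : Nat) : Int) = r := hidx0
              rw [pvRankVal_insert_mem _ _ _ _ (pvF4 p hp) hmem 0]
              simp only [zero_add, hidx]
              obtain ⟨ih1, ih2⟩ := ihf p hp
              cases hold : pvRankVal (pvNormDict row) p.2 0 with
              | none =>
                  have hc0 : st.2.contains p.1 = false := by
                    rw [PySem.Dict.contains_eq_isSome_get?, ih1, hold]; rfl
                  have hcb : (!st.2.contains p.1 || decide (r ≤ st.2.getD p.1 0)) = true := by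
                    rw [hc0]; rfl
                  simp only [pvStepB, hhit, hcb, if_true]
                  exact ⟨by rw [PySem.Dict.get?_insert_self]; simp,
                         by rw [PySem.Dict.getD_insert_self]; simp⟩
              | some rw0 =>
                  obtain ⟨r0, w0⟩ := rw0
                  rw [hold] at ih1 ih2
                  have hc1 : st.2.contains p.1 = true := by
                    rw [PySem.Dict.contains_eq_isSome_get?, ih1]; rfl
                  have hgd : st.2.getD p.1 0 = r0 := by
                    rw [PySem.Dict.getD_eq_get?_getD, ih1]; rfl
                  by_cases hle : r ≤ r0
                  · have hcb : (!st.2.contains p.1 || decide (r ≤ st.2.getD p.1 0)) = true := by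
                      rw [hc1, hgd]; simp [hle]
                    simp only [pvStepB, hhit, hcb, if_true, if_pos hle]
                    exact ⟨by rw [PySem.Dict.get?_insert_self]; simp,
                           by rw [PySem.Dict.getD_insert_self]; simp⟩
                  · have hcb : (!st.2.contains p.1 || decide (r ≤ st.2.getD p.1 0)) = false := by
                      rw [hc1, hgd]; simp [hle]
                    simp only [pvStepB, hhit, hcb, Bool.false_eq_true, if_false, if_neg hle]
                    exact ⟨ih1, ih2⟩
            · -- the alias feeds a different field: everything at p unchanged
              have hnm : ¬ pvNormName q.1 ∈ p.2 := (pvF2 _ hq p hp).2 hg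
              rw [pvRankVal_insert_not_mem _ _ _ _ hnm]
              have hne : p.1 ≠ g := fun hh => hg hh.symm
              obtain ⟨ih1, ih2⟩ := ihf p hp
              simp only [pvStepB, hhit]
              split_ifs with hcond
              · exact ⟨by rw [PySem.Dict.get?_insert_of_ne _ _ hne]; exact ih1,
                       by rw [PySem.Dict.getD_insert_of_ne _ _ _ hne]; exact ih2⟩
              · exact ⟨ih1, ih2⟩

theorem transform_header_row_py_spec : Claim_equal_transform_header_row_py := by
  intro row _
  show transform_header_row_py row = transform_header_row_py_alt row
  obtain ⟨hk, hf⟩ := pvFoldB_inv row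
  set st := row.foldl pvStepB (pvInit, PySem.Dict.empty) with hst
  have hnodup : st.1.keys.Nodup := by rw [hk]; exact pvF5
  calc transform_header_row_py row
      = pvFieldKeys.map (fun p => (p.1, pvPick (pvNormDict row) p.2)) := rfl
    _ = pvFieldKeys.map (fun p => (p.1, st.1.getD p.1 "")) := by
        refine List.map_congr_left (fun p hp => ?_)
        rw [(hf p hp).2, pvPick_eq_rankVal _ _ 0]
    _ = (pvFieldKeys.map Prod.fst).map (fun k => (k, st.1.getD k "")) := by
        rw [List.map_map]; rfl
    _ = st.1.keys.map (fun k => (k, st.1.getD k "")) := by rw [hk]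
    _ = st.1.items := (PySem.Dict.items_eq_map_keys _ hnodup "").symm
    _ = transform_header_row_py_alt row := rfl
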